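-- pv_equiv track=rewrite | github.com/Mosakaa/Processor-3 | Processor(2).py | _combine_patterns
-- ===== SOURCE A (Python) =====
-- def _combine_patterns(left_pattern, right_pattern):
--     difference_count = 0
--     combined = []
--
--     for left_bit, right_bit in zip(left_pattern, right_pattern):
--         if left_bit == right_bit:
--             combined.append(left_bit)
--         elif left_bit != right_bit and left_bit != "-" and right_bit != "-":
--             difference_count += 1
--             combined.append("-")
--         else:
--             return None
--
--         if difference_count > 1:
--             return None
--
--     if difference_count == 1:
--         return "".join(combined)
--
--     return None
-- ===== SOURCE B (Python) =====
-- def _combine_patterns(left_pattern, right_pattern):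
--     pairs = list(zip(left_pattern, right_pattern))
--     diffs = [(l, r) for l, r in pairs if l != r]
--     if len(diffs) != 1:
--         return None
--     l, r = diffs[0]
--     if l == "-" or r == "-":
--         return None
--     return "".join(a if a == b else "-" for a, b in pairs)
-- ===== Notes on version B (the rewrite author's own statement) =====
-- stated objective: simpler
-- what changed: Replaces the fused single loop with counter, incremental build and three early returns by a two-phase pipeline: filter out the differing pairs, decide on that list alone, then build the combined string in one comprehension.
import Mathlib
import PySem

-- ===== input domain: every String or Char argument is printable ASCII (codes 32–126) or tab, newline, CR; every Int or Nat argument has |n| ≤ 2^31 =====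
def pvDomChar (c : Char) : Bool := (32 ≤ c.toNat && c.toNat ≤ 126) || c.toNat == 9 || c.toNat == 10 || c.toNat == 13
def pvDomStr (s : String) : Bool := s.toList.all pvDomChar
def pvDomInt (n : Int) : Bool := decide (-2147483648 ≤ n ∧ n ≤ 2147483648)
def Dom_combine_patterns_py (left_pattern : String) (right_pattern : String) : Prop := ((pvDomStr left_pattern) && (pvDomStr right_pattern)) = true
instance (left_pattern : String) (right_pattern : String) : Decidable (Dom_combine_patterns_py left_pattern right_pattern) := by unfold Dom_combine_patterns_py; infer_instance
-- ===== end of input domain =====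

-- B replaces A's fused loop (difference counter + incremental build + early returns) by a
-- filter-the-differing-pairs / decide / build-in-one-comprehension pipeline; objective: simpler.


-- ===== PORT A =====
-- A's for-loop: state = (difference_count, combined); every `return None` is `none`
def pvGoA : List (Char × Char) → Int → List Char → Option String
  | [], difference_count, combined =>
      if difference_count = 1 then some (String.mk combined) else none
  | (left_bit, right_bit) :: rest, difference_count, combined =>
      if left_bit = right_bit then
        if difference_count > 1 then none
        else pvGoA rest difference_count (combined ++ [left_bit])
      else if left_bit ≠ right_bit ∧ left_bit ≠ '-' ∧ right_bit ≠ '-' then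
        if difference_count + 1 > 1 then none
        else pvGoA rest (difference_count + 1) (combined ++ ['-'])
      else none

def combine_patterns_py (left_pattern : String) (right_pattern : String) : Option String :=
  pvGoA (left_pattern.toList.zip right_pattern.toList) 0 []

-- ===== PORT B =====
def combine_patterns_py_alt (left_pattern : String) (right_pattern : String) : Option String :=
  let pairs := left_pattern.toList.zip right_pattern.toList
  let diffs := pairs.filter (fun p => p.1 != p.2)
  match diffs with
  | [(l, r)] =>
      if l = '-' ∨ r = '-' then none
      else some (String.mk (pairs.map (fun p => if p.1 = p.2 then p.1 else '-')))
  | _ => none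

-- ===== PRECONDITION & SPEC =====
def Spec_combine_patterns_py (left_pattern : String) (right_pattern : String) (out : Option String) : Prop := out = combine_patterns_py_alt left_pattern right_pattern
instance (left_pattern : String) (right_pattern : String) (out : Option String) : Decidable (Spec_combine_patterns_py left_pattern right_pattern out) := by unfold Spec_combine_patterns_py; infer_instance

-- ===== CLAIM (what is proved, stated in full; the proofs are below) =====
def Claim_equal_combine_patterns_py : Prop := ∀ (left_pattern : String) (right_pattern : String), Dom_combine_patterns_py left_pattern right_pattern → Spec_combine_patterns_py left_pattern right_pattern (combine_patterns_py left_pattern right_pattern)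

-- ===== LEMMAS AND PROOFS =====

-- B's decide-and-build phase, on an arbitrary pair list with an accumulator
def pvBuildB (ps : List (Char × Char)) (acc : List Char) : Option String :=
  match ps.filter (fun p => p.1 != p.2) with
  | [(l, r)] =>
      if l = '-' ∨ r = '-' then none
      else some (String.mk (acc ++ ps.map (fun p => if p.1 = p.2 then p.1 else '-')))
  | _ => none

-- A's loop with difference_count = 1 succeeds exactly when no further pair differs
theorem pvGoA_one (ps : List (Char × Char)) : ∀ acc : List Char,
    pvGoA ps 1 acc =
      if ps.all (fun p => p.1 == p.2) then some (String.mk (acc ++ ps.map Prod.fst)) else none := by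
  induction ps with
  | nil => intro acc; simp [pvGoA]
  | cons p t ih =>
      intro acc
      obtain ⟨l, r⟩ := p
      by_cases h : l = r
      · subst h
        rw [show pvGoA ((l,l)::t) 1 acc = pvGoA t 1 (acc ++ [l]) by simp [pvGoA], ih]
        by_cases ht : t.all (fun p => p.1 == p.2) <;> simp [ht, List.all_cons]
      · rw [show pvGoA ((l,r)::t) 1 acc = none by simp [pvGoA, h]]
        simp [List.all_cons, h]

theorem pvGoA_zero (ps : List (Char × Char)) : ∀ acc : List Char,
    pvGoA ps 0 acc = pvBuildB ps acc := by
  induction ps with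
  | nil => intro acc; simp [pvGoA, pvBuildB]
  | cons p t ih =>
      intro acc
      obtain ⟨l, r⟩ := p
      by_cases h : l = r
      · subst h
        rw [show pvGoA ((l,l)::t) 0 acc = pvGoA t 0 (acc ++ [l]) by simp [pvGoA], ih]
        have hfc : ((l,l)::t).filter (fun p => p.1 != p.2) = t.filter (fun p => p.1 != p.2) := by
          simp
        simp only [pvBuildB, hfc, List.map_cons]
        cases hft : t.filter (fun p => p.1 != p.2) with
        | nil => simp
        | cons a s => cases a with | mk al ar => cases s <;> simp
      · have hfc : ((l,r)::t).filter (fun p => p.1 != p.2)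
            = (l,r) :: t.filter (fun p => p.1 != p.2) := by simp [h]
        by_cases hd : l = '-' ∨ r = '-'
        · rw [show pvGoA ((l,r)::t) 0 acc = none by simp [pvGoA, h]; tauto]
          simp only [pvBuildB, hfc]
          cases hft : t.filter (fun p => p.1 != p.2) with
          | nil => simp [hd]
          | cons a s => simp
        · push_neg at hd
          rw [show pvGoA ((l,r)::t) 0 acc = pvGoA t (0+1) (acc ++ ['-']) by
              simp [pvGoA, h, hd.1, hd.2]]
          rw [show (0:Int)+1 = 1 by norm_num, pvGoA_one]
          simp only [pvBuildB, hfc]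
          cases hft : t.filter (fun p => p.1 != p.2) with
          | nil =>
              have hall : ∀ p ∈ t, p.1 = p.2 := by
                intro p hp
                have := List.filter_eq_nil_iff.mp hft p hp
                simpa using this
              have ht : t.all (fun p => p.1 == p.2) = true := by
                rw [List.all_eq_true]; intro p hp; simpa using hall p hp
              have hmap : List.map Prod.fst t
                  = List.map (fun p : Char × Char => if p.1 = p.2 then p.1 else '-') t :=
                List.map_congr_left (fun p hp => by have := hall p hp; simp [this])
              simp [ht, hd.1, hd.2, h, ← hmap]
          | cons a s =>
              have ht : ¬ t.all (fun p => p.1 == p.2) = true := by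
                intro hallt
                have ha : a ∈ t.filter (fun p => p.1 != p.2) := by simp [hft]
                have h1 := List.of_mem_filter ha
                have h2 := List.all_eq_true.mp hallt a (List.mem_of_mem_filter ha)
                simp_all
              cases s <;> simp [ht]

-- ===== VERDICT (by name: the statement is the Claim_ definition above) =====
theorem combine_patterns_py_spec : Claim_equal_combine_patterns_py := by
  intro lp rp _
  unfold Spec_combine_patterns_py combine_patterns_py combine_patterns_py_alt
  rw [pvGoA_zero]
  simp [pvBuildB]
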